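-- pv_equiv track=rewrite | github.com/AdityaC-0605/GenAI-Proj | src/evaluation/error_analyzer.py | _are_similar_languages
-- ===== SOURCE A (Python) =====
-- def _are_similar_languages(lang1: str, lang2: str) -> bool:
--     """
--     Check if two languages are from similar families.
--
--     Args:
--         lang1: First language code
--         lang2: Second language code
--
--     Returns:
--         True if languages are from similar families
--     """
--     # Language family groupings
--     romance = {'es', 'fr', 'it', 'pt', 'ro'}
--     germanic = {'en', 'de', 'nl', 'sv', 'da'}
--     slavic = {'ru', 'pl', 'cs', 'uk'}
--     cjk = {'zh', 'ja', 'ko'}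
--
--     families = [romance, germanic, slavic, cjk]
--
--     for family in families:
--         if lang1 in family and lang2 in family:
--             return True
--
--     return False
-- ===== SOURCE B (Python) =====
-- _LANG2FAMILY = {
--     'es': 'romance', 'fr': 'romance', 'it': 'romance', 'pt': 'romance', 'ro': 'romance',
--     'en': 'germanic', 'de': 'germanic', 'nl': 'germanic', 'sv': 'germanic', 'da': 'germanic',
--     'ru': 'slavic', 'pl': 'slavic', 'cs': 'slavic', 'uk': 'slavic',
--     'zh': 'cjk', 'ja': 'cjk', 'ko': 'cjk',
-- }
--
--
-- def _are_similar_languages(lang1: str, lang2: str) -> bool: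
--     f1 = _LANG2FAMILY.get(lang1)
--     return f1 is not None and f1 == _LANG2FAMILY.get(lang2)
-- ===== Notes on version B (the rewrite author's own statement) =====
-- stated objective: idiomatic
-- what changed: Replaces the scan over a list of family sets (membership-testing both codes in each set) with a single code-to-family dict built once; the body is two lookups and an equality guard, with f1-is-not-None preventing a spurious match when both codes are unknown.
import Mathlib
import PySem

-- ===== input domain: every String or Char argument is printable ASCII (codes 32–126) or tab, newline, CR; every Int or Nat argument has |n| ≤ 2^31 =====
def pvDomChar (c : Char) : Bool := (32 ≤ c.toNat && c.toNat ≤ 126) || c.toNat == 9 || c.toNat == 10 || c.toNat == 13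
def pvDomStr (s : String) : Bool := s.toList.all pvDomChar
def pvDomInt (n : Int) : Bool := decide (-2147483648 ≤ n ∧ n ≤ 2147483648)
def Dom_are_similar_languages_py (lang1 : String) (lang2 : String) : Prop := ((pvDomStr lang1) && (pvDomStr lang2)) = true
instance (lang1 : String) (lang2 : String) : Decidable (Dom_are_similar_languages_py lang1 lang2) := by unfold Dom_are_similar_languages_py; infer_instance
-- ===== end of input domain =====

-- B replaces A's scan over a list of family sets with one code→family dict and two lookups (idiomatic rewrite, same behaviour).

-- ===== PORT A =====
-- 'for family in families: if lang1 in family and lang2 in family: return True' / 'return False'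
def loopA (lang1 : String) (lang2 : String) : List (PySem.Set String) → Bool
  | [] => false
  | family :: rest =>
      if PySem.Set.contains family lang1 && PySem.Set.contains family lang2 then true
      else loopA lang1 lang2 rest

def are_similar_languages_py (lang1 : String) (lang2 : String) : Bool :=
  let romance : PySem.Set String := PySem.Set.ofList ["es", "fr", "it", "pt", "ro"]
  let germanic : PySem.Set String := PySem.Set.ofList ["en", "de", "nl", "sv", "da"]
  let slavic : PySem.Set String := PySem.Set.ofList ["ru", "pl", "cs", "uk"]
  let cjk : PySem.Set String := PySem.Set.ofList ["zh", "ja", "ko"]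
  let families := [romance, germanic, slavic, cjk]
  loopA lang1 lang2 families

-- ===== PORT B =====
def lang2family : PySem.Dict String String :=
  PySem.Dict.ofList
    [("es", "romance"), ("fr", "romance"), ("it", "romance"), ("pt", "romance"), ("ro", "romance"),
     ("en", "germanic"), ("de", "germanic"), ("nl", "germanic"), ("sv", "germanic"), ("da", "germanic"),
     ("ru", "slavic"), ("pl", "slavic"), ("cs", "slavic"), ("uk", "slavic"),
     ("zh", "cjk"), ("ja", "cjk"), ("ko", "cjk")]

-- 'f1 = _LANG2FAMILY.get(lang1); return f1 is not None and f1 == _LANG2FAMILY.get(lang2)'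
def are_similar_languages_py_alt (lang1 : String) (lang2 : String) : Bool :=
  match PySem.Dict.get? lang2family lang1 with
  | none => false
  | some f1 => PySem.Dict.get? lang2family lang2 == some f1

-- ===== PRECONDITION & SPEC =====
def Spec_are_similar_languages_py (lang1 : String) (lang2 : String) (out : Bool) : Prop := out = are_similar_languages_py_alt lang1 lang2
instance (lang1 : String) (lang2 : String) (out : Bool) : Decidable (Spec_are_similar_languages_py lang1 lang2 out) := by unfold Spec_are_similar_languages_py; infer_instance

-- ===== CLAIM (what is proved, stated in full; the proofs are below) =====
def Claim_equal_are_similar_languages_py : Prop := ∀ (lang1 : String) (lang2 : String), Dom_are_similar_languages_py lang1 lang2 → Spec_are_similar_languages_py lang1 lang2 (are_similar_languages_py lang1 lang2)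

-- ===== LEMMAS AND PROOFS =====
theorem mkfam : lang2family = PySem.Dict.mk
    [("es", "romance"), ("fr", "romance"), ("it", "romance"), ("pt", "romance"), ("ro", "romance"),
     ("en", "germanic"), ("de", "germanic"), ("nl", "germanic"), ("sv", "germanic"), ("da", "germanic"),
     ("ru", "slavic"), ("pl", "slavic"), ("cs", "slavic"), ("uk", "slavic"),
     ("zh", "cjk"), ("ja", "cjk"), ("ko", "cjk")] := by decide

-- proof-side helper: the family of a code, as an if-chain
def famChain (lang : String) : Option String :=
  if lang = "es" then some "romance" else if lang = "fr" then some "romance" else if lang = "it" then some "romance" else if lang = "pt" then some "romance" else if lang = "ro" then some "romance" else if lang = "en" then some "germanic" else if lang = "de" then some "germanic" else if lang = "nl" then some "germanic" else if lang = "sv" then some "germanic" else if lang = "da" then some "germanic" else if lang = "ru" then some "slavic" else if lang = "pl" then some "slavic" else if lang = "cs" then some "slavic" else if lang = "uk" then some "slavic" else if lang = "zh" then some "cjk" else if lang = "ja" then some "cjk" else if lang = "ko" then some "cjk" else none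

theorem get?_famChain (lang : String) : PySem.Dict.get? lang2family lang = famChain lang := by
  by_cases h0 : lang = "es"
  · subst h0; decide
  by_cases h1 : lang = "fr"
  · subst h1; decide
  by_cases h2 : lang = "it"
  · subst h2; decide
  by_cases h3 : lang = "pt"
  · subst h3; decide
  by_cases h4 : lang = "ro"
  · subst h4; decide
  by_cases h5 : lang = "en"
  · subst h5; decide
  by_cases h6 : lang = "de"
  · subst h6; decide
  by_cases h7 : lang = "nl"
  · subst h7; decide
  by_cases h8 : lang = "sv"
  · subst h8; decide
  by_cases h9 : lang = "da"
  · subst h9; decide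
  by_cases h10 : lang = "ru"
  · subst h10; decide
  by_cases h11 : lang = "pl"
  · subst h11; decide
  by_cases h12 : lang = "cs"
  · subst h12; decide
  by_cases h13 : lang = "uk"
  · subst h13; decide
  by_cases h14 : lang = "zh"
  · subst h14; decide
  by_cases h15 : lang = "ja"
  · subst h15; decide
  by_cases h16 : lang = "ko"
  · subst h16; decide
  simp [mkfam, famChain, PySem.Dict.get?, beq_iff_eq, Ne.symm h0, Ne.symm h1, Ne.symm h2, Ne.symm h3, Ne.symm h4, Ne.symm h5, Ne.symm h6, Ne.symm h7, Ne.symm h8, Ne.symm h9, Ne.symm h10, Ne.symm h11, Ne.symm h12, Ne.symm h13, Ne.symm h14, Ne.symm h15, Ne.symm h16, h0, h1, h2, h3, h4, h5, h6, h7, h8, h9, h10, h11, h12, h13, h14, h15, h16]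

theorem contains_romance (lang : String) :
    PySem.Set.contains (PySem.Set.ofList ["es", "fr", "it", "pt", "ro"]) lang = (famChain lang == some "romance") := by
  by_cases h0 : lang = "es"
  · subst h0; decide
  by_cases h1 : lang = "fr"
  · subst h1; decide
  by_cases h2 : lang = "it"
  · subst h2; decide
  by_cases h3 : lang = "pt"
  · subst h3; decide
  by_cases h4 : lang = "ro"
  · subst h4; decide
  by_cases h5 : lang = "en"
  · subst h5; decide
  by_cases h6 : lang = "de"
  · subst h6; decide
  by_cases h7 : lang = "nl"
  · subst h7; decide
  by_cases h8 : lang = "sv"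
  · subst h8; decide
  by_cases h9 : lang = "da"
  · subst h9; decide
  by_cases h10 : lang = "ru"
  · subst h10; decide
  by_cases h11 : lang = "pl"
  · subst h11; decide
  by_cases h12 : lang = "cs"
  · subst h12; decide
  by_cases h13 : lang = "uk"
  · subst h13; decide
  by_cases h14 : lang = "zh"
  · subst h14; decide
  by_cases h15 : lang = "ja"
  · subst h15; decide
  by_cases h16 : lang = "ko"
  · subst h16; decide
  simp [famChain, PySem.Set.contains, PySem.Set.ofList, PySem.Set.add, h0, h1, h2, h3, h4, h5, h6, h7, h8, h9, h10, h11, h12, h13, h14, h15, h16]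

theorem contains_germanic (lang : String) :
    PySem.Set.contains (PySem.Set.ofList ["en", "de", "nl", "sv", "da"]) lang = (famChain lang == some "germanic") := by
  by_cases h0 : lang = "es"
  · subst h0; decide
  by_cases h1 : lang = "fr"
  · subst h1; decide
  by_cases h2 : lang = "it"
  · subst h2; decide
  by_cases h3 : lang = "pt"
  · subst h3; decide
  by_cases h4 : lang = "ro"
  · subst h4; decide
  by_cases h5 : lang = "en"
  · subst h5; decide
  by_cases h6 : lang = "de"
  · subst h6; decide
  by_cases h7 : lang = "nl"
  · subst h7; decide
  by_cases h8 : lang = "sv"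
  · subst h8; decide
  by_cases h9 : lang = "da"
  · subst h9; decide
  by_cases h10 : lang = "ru"
  · subst h10; decide
  by_cases h11 : lang = "pl"
  · subst h11; decide
  by_cases h12 : lang = "cs"
  · subst h12; decide
  by_cases h13 : lang = "uk"
  · subst h13; decide
  by_cases h14 : lang = "zh"
  · subst h14; decide
  by_cases h15 : lang = "ja"
  · subst h15; decide
  by_cases h16 : lang = "ko"
  · subst h16; decide
  simp [famChain, PySem.Set.contains, PySem.Set.ofList, PySem.Set.add, h0, h1, h2, h3, h4, h5, h6, h7, h8, h9, h10, h11, h12, h13, h14, h15, h16]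

theorem contains_slavic (lang : String) :
    PySem.Set.contains (PySem.Set.ofList ["ru", "pl", "cs", "uk"]) lang = (famChain lang == some "slavic") := by
  by_cases h0 : lang = "es"
  · subst h0; decide
  by_cases h1 : lang = "fr"
  · subst h1; decide
  by_cases h2 : lang = "it"
  · subst h2; decide
  by_cases h3 : lang = "pt"
  · subst h3; decide
  by_cases h4 : lang = "ro"
  · subst h4; decide
  by_cases h5 : lang = "en"
  · subst h5; decide
  by_cases h6 : lang = "de"
  · subst h6; decide
  by_cases h7 : lang = "nl"
  · subst h7; decide
  by_cases h8 : lang = "sv"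
  · subst h8; decide
  by_cases h9 : lang = "da"
  · subst h9; decide
  by_cases h10 : lang = "ru"
  · subst h10; decide
  by_cases h11 : lang = "pl"
  · subst h11; decide
  by_cases h12 : lang = "cs"
  · subst h12; decide
  by_cases h13 : lang = "uk"
  · subst h13; decide
  by_cases h14 : lang = "zh"
  · subst h14; decide
  by_cases h15 : lang = "ja"
  · subst h15; decide
  by_cases h16 : lang = "ko"
  · subst h16; decide
  simp [famChain, PySem.Set.contains, PySem.Set.ofList, PySem.Set.add, h0, h1, h2, h3, h4, h5, h6, h7, h8, h9, h10, h11, h12, h13, h14, h15, h16]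

theorem contains_cjk (lang : String) :
    PySem.Set.contains (PySem.Set.ofList ["zh", "ja", "ko"]) lang = (famChain lang == some "cjk") := by
  by_cases h0 : lang = "es"
  · subst h0; decide
  by_cases h1 : lang = "fr"
  · subst h1; decide
  by_cases h2 : lang = "it"
  · subst h2; decide
  by_cases h3 : lang = "pt"
  · subst h3; decide
  by_cases h4 : lang = "ro"
  · subst h4; decide
  by_cases h5 : lang = "en"
  · subst h5; decide
  by_cases h6 : lang = "de"
  · subst h6; decide
  by_cases h7 : lang = "nl"
  · subst h7; decide
  by_cases h8 : lang = "sv"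
  · subst h8; decide
  by_cases h9 : lang = "da"
  · subst h9; decide
  by_cases h10 : lang = "ru"
  · subst h10; decide
  by_cases h11 : lang = "pl"
  · subst h11; decide
  by_cases h12 : lang = "cs"
  · subst h12; decide
  by_cases h13 : lang = "uk"
  · subst h13; decide
  by_cases h14 : lang = "zh"
  · subst h14; decide
  by_cases h15 : lang = "ja"
  · subst h15; decide
  by_cases h16 : lang = "ko"
  · subst h16; decide
  simp [famChain, PySem.Set.contains, PySem.Set.ofList, PySem.Set.add, h0, h1, h2, h3, h4, h5, h6, h7, h8, h9, h10, h11, h12, h13, h14, h15, h16]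

theorem famChain_cases (lang : String) :
    famChain lang = none ∨ famChain lang = some "romance" ∨ famChain lang = some "germanic" ∨
    famChain lang = some "slavic" ∨ famChain lang = some "cjk" := by
  by_cases h0 : lang = "es"
  · subst h0; decide
  by_cases h1 : lang = "fr"
  · subst h1; decide
  by_cases h2 : lang = "it"
  · subst h2; decide
  by_cases h3 : lang = "pt"
  · subst h3; decide
  by_cases h4 : lang = "ro"
  · subst h4; decide
  by_cases h5 : lang = "en"
  · subst h5; decide
  by_cases h6 : lang = "de"
  · subst h6; decide
  by_cases h7 : lang = "nl"
  · subst h7; decide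
  by_cases h8 : lang = "sv"
  · subst h8; decide
  by_cases h9 : lang = "da"
  · subst h9; decide
  by_cases h10 : lang = "ru"
  · subst h10; decide
  by_cases h11 : lang = "pl"
  · subst h11; decide
  by_cases h12 : lang = "cs"
  · subst h12; decide
  by_cases h13 : lang = "uk"
  · subst h13; decide
  by_cases h14 : lang = "zh"
  · subst h14; decide
  by_cases h15 : lang = "ja"
  · subst h15; decide
  by_cases h16 : lang = "ko"
  · subst h16; decide
  simp [famChain, h0, h1, h2, h3, h4, h5, h6, h7, h8, h9, h10, h11, h12, h13, h14, h15, h16]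

theorem equal_aux (lang1 lang2 : String) :
    are_similar_languages_py lang1 lang2 = are_similar_languages_py_alt lang1 lang2 := by
  simp only [are_similar_languages_py, are_similar_languages_py_alt, loopA, get?_famChain,
    contains_romance, contains_germanic, contains_slavic, contains_cjk]
  rcases famChain_cases lang1 with e1 | e1 | e1 | e1 | e1 <;>
    rcases famChain_cases lang2 with e2 | e2 | e2 | e2 | e2 <;> rw [e1, e2] <;> decide


-- ===== VERDICT (by name: the statement is the Claim_ definition above) =====
theorem are_similar_languages_py_spec : Claim_equal_are_similar_languages_py := by
  intro lang1 lang2 _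
  exact equal_aux lang1 lang2
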